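-- pv_equiv track=rewrite | github.com/JohnCCarter/Genesis-Core | src/core/ml/labeling.py | align_features_with_labels
-- ===== SOURCE A (Python) =====
-- def align_features_with_labels(
--     features_count: int,
--     labels: list[int | None],
-- ) -> tuple[int, int]:
--     """
--     Calculate valid range for features-labels alignment.
--
--     Returns indices [start, end) where both features and labels are valid.
--     Excludes rows where label is None.
--
--     Args:
--         features_count: Number of feature rows
--         labels: List of labels (may contain None)
--
--     Returns:
--         Tuple of (start_idx, end_idx) for valid data
--
--     Example:
--         >>> features_count = 100
--         >>> labels = [1, 0, 1, ..., None, None]  # Last 10 are None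
--         >>> align_features_with_labels(features_count, labels)
--         (0, 90)  # First 90 rows have valid labels
--     """
--     if features_count != len(labels):
--         raise ValueError(
--             f"Features count ({features_count}) must match labels length ({len(labels)})"
--         )
--
--     # Find first valid label
--     start_idx = 0
--     for i, label in enumerate(labels):
--         if label is not None:
--             start_idx = i
--             break
--     else:
--         # No valid labels found
--         return 0, 0
--
--     # Find last valid label
--     end_idx = len(labels)
--     for i in range(len(labels) - 1, -1, -1):
--         if labels[i] is not None:
--             end_idx = i + 1
--             break
--
--     return start_idx, end_idx
-- ===== SOURCE B (Python) =====
-- def align_features_with_labels(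
--     features_count: int,
--     labels: list[int | None],
-- ) -> tuple[int, int]:
--     """Single pass: collect indices of non-None labels, read range off the ends."""
--     if features_count != len(labels):
--         raise ValueError(
--             f"Features count ({features_count}) must match labels length ({len(labels)})"
--         )
--     valid = [i for i, label in enumerate(labels) if label is not None]
--     if not valid:
--         return 0, 0
--     return valid[0], valid[-1] + 1
-- ===== Notes on version B (the rewrite author's own statement) =====
-- stated objective: simpler
-- what changed: Replaces A's two opposite-direction early-breaking boundary scans with one forward pass that builds the list of valid-label indices and reads (first, last+1) off its ends.
import Mathlib
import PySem

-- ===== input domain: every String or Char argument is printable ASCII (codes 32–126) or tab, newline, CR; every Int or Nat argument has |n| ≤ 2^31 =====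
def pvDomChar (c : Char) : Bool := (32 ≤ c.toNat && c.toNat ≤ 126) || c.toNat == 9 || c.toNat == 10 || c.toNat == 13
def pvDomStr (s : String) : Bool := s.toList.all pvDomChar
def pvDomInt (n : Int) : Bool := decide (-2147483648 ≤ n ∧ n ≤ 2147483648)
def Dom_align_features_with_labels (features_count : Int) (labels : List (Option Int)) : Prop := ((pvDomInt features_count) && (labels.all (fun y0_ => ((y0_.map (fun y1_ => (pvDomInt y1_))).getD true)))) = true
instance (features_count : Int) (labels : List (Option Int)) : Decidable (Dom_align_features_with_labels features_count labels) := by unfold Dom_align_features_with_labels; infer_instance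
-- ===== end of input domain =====

-- B replaces A's two opposite-direction early-breaking scans by one forward pass building the
-- list of valid indices (objective: simpler). A raises ValueError when features_count ≠ len(labels);
-- Pre_ excludes exactly those inputs.

-- ===== PORT A =====
-- first loop: 'for i, label in enumerate(labels): if label is not None: start_idx = i; break  else: return 0,0'
def aFindStart : List (Option Int) → Int → Option Int
  | [], _ => none
  | some _ :: _, i => some i
  | none :: rest, i => aFindStart rest (i + 1)

-- second loop: 'end_idx = len(labels); for i in range(len(labels)-1, -1, -1): if labels[i] is not None: end_idx = i+1; break'
def aFindEnd (labels : List (Option Int)) (end_idx : Int) : List Int → Int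
  | [] => end_idx
  | i :: rest =>
    match PySem.List.pyGet? labels i with
    | some (some _) => i + 1
    | _ => aFindEnd labels end_idx rest

def align_features_with_labels (features_count : Int) (labels : List (Option Int)) : Int × Int :=
  match aFindStart labels 0 with
  | none => (0, 0)
  | some start_idx =>
    (start_idx,
     aFindEnd labels (labels.length : Int) (PySem.List.pyRange ((labels.length : Int) - 1) (-1) (-1)))

-- ===== PORT B =====
def bValid (labels : List (Option Int)) : List Int :=
  ((PySem.List.enumerate labels).filter (fun p => p.2 ≠ none)).map (fun p => p.1)

def align_features_with_labels_alt (features_count : Int) (labels : List (Option Int)) : Int × Int :=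
  match h : bValid labels with
  | [] => (0, 0)
  | i :: rest => (i, (i :: rest).getLast (by simp) + 1)

-- ===== PRECONDITION & SPEC =====
-- A raises ValueError when features_count ≠ len(labels); Pre_ excludes exactly those inputs.
def Pre_align_features_with_labels (features_count : Int) (labels : List (Option Int)) : Prop :=
  features_count = (labels.length : Int)
instance (features_count : Int) (labels : List (Option Int)) : Decidable (Pre_align_features_with_labels features_count labels) := by unfold Pre_align_features_with_labels; infer_instance

def pvWitness_align_features_with_labels : Int × List (Option Int) := (3, [none, some 1, none])

def Spec_align_features_with_labels (features_count : Int) (labels : List (Option Int)) (out : Int × Int) : Prop := out = align_features_with_labels_alt features_count labels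
instance (features_count : Int) (labels : List (Option Int)) (out : Int × Int) : Decidable (Spec_align_features_with_labels features_count labels out) := by unfold Spec_align_features_with_labels; infer_instance

-- ===== CLAIM (what is proved, stated in full; the proofs are below) =====
def Claim_equal_align_features_with_labels : Prop := ∀ (features_count : Int) (labels : List (Option Int)), Dom_align_features_with_labels features_count labels → Pre_align_features_with_labels features_count labels → Spec_align_features_with_labels features_count labels (align_features_with_labels features_count labels)

-- ===== LEMMAS AND PROOFS =====

-- canonical description of the valid-index list, with a shift for the offset
def myValid : List (Option Int) → List Int
  | [] => []
  | some _ :: t => 0 :: (myValid t).map (· + 1)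
  | none :: t => (myValid t).map (· + 1)

theorem bValid_shift (labels : List (Option Int)) (s : Int) :
    ((PySem.List.enumerate labels s).filter (fun p => p.2 ≠ none)).map (fun p => p.1)
      = (myValid labels).map (· + s) := by
  induction labels generalizing s with
  | nil => simp [PySem.List.enumerate_nil, myValid]
  | cons x t ih =>
    cases x with
    | none =>
      simp only [PySem.List.enumerate_cons, myValid, List.filter_cons]
      rw [if_neg (by simp), ih (s + 1), List.map_map]
      exact List.map_congr_left (fun a _ => by simp [Function.comp]; ring)
    | some v =>
      simp only [PySem.List.enumerate_cons, myValid, List.filter_cons]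
      rw [if_pos (by simp)]
      simp only [List.map_cons, List.map_map]
      rw [ih (s + 1)]
      refine List.cons_eq_cons.mpr ⟨by ring, ?_⟩
      exact List.map_congr_left (fun a _ => by simp [Function.comp]; ring)

theorem bValid_eq_myValid (labels : List (Option Int)) : bValid labels = myValid labels := by
  have := bValid_shift labels 0
  simpa [bValid, PySem.List.enumerate] using this

-- A's forward scan returns the head of the valid-index list (shifted by the accumulator)
theorem aFindStart_eq (labels : List (Option Int)) (s : Int) :
    aFindStart labels s = (myValid labels).head?.map (· + s) := by
  induction labels generalizing s with
  | nil => simp [aFindStart, myValid]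
  | cons x t ih =>
    cases x with
    | none =>
      simp only [aFindStart, myValid, ih (s + 1)]
      cases h : (myValid t).head? with
      | none => simp [List.head?_map, h]
      | some a => simp [List.head?_map, h]; ring
    | some v => simp [aFindStart, myValid]

-- aFindEnd only inspects labels through pyGet? on indices of the list; congruence under agreement
theorem aFindEnd_congr (l l' : List (Option Int)) (d : Int) (is : List Int)
    (h : ∀ i ∈ is, PySem.List.pyGet? l i = PySem.List.pyGet? l' i) :
    aFindEnd l d is = aFindEnd l' d is := by
  induction is with
  | nil => rfl
  | cons i rest ih =>
    simp only [aFindEnd]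
    rw [h i (by simp)]
    cases PySem.List.pyGet? l' i with
    | none => exact ih (fun j hj => h j (by simp [hj]))
    | some o =>
      cases o with
      | none => exact ih (fun j hj => h j (by simp [hj]))
      | some v => rfl

theorem myValid_append_some (t : List (Option Int)) (v : Int) :
    myValid (t ++ [some v]) = myValid t ++ [(t.length : Int)] := by
  induction t with
  | nil => simp [myValid]
  | cons y t' ih =>
    cases y <;> simp [myValid, ih, List.map_append]

theorem myValid_append_none (t : List (Option Int)) :
    myValid (t ++ [none]) = myValid t := by
  induction t with
  | nil => simp [myValid]
  | cons y t' ih =>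
    cases y <;> simp [myValid, ih]

-- backward scan characterised by the last valid index
theorem aFindEnd_eq (labels : List (Option Int)) (d : Int) :
    aFindEnd labels d (PySem.List.pyRange ((labels.length : Int) - 1) (-1) (-1))
      = ((myValid labels).getLast?.map (· + 1)).getD d := by
  induction labels using List.reverseRecOn with
  | nil =>
    rw [PySem.List.pyRange_neg_one_eq_nil (by simp)]
    simp [aFindEnd, myValid]
  | append_singleton t x ih =>
    have hlen : ((t ++ [x]).length : Int) - 1 = (t.length : Int) := by simp
    rw [hlen, PySem.List.pyRange_neg_one_cons (by omega)]
    simp only [aFindEnd]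
    have hget : PySem.List.pyGet? (t ++ [x]) (t.length : Int) = some x :=
      PySem.List.pyGet?_append_length t [] x
    rw [hget]
    cases x with
    | some v =>
      rw [myValid_append_some]
      simp
    | none =>
      rw [myValid_append_none]
      have hcongr : aFindEnd (t ++ [none]) d (PySem.List.pyRange ((t.length : Int) - 1) (-1) (-1))
          = aFindEnd t d (PySem.List.pyRange ((t.length : Int) - 1) (-1) (-1)) := by
        apply aFindEnd_congr
        intro i hi
        rw [PySem.List.mem_pyRange_neg_one] at hi
        obtain ⟨h1, h2⟩ := hi
        have h0 : 0 ≤ i := by omega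
        have hlt : i < (t.length : Int) := by omega
        rw [PySem.List.pyGet?_of_nonneg (xs := t ++ [none]) h0,
            PySem.List.pyGet?_of_nonneg (xs := t) h0]
        rw [List.getElem?_append_left (by omega)]
      rw [hcongr, ih]

-- ===== VERDICT (by name: the statement is the Claim_ definition above) =====
theorem align_features_with_labels_spec : Claim_equal_align_features_with_labels := by
  intro fc labels _ _
  unfold Spec_align_features_with_labels align_features_with_labels align_features_with_labels_alt
  rw [aFindStart_eq, aFindEnd_eq]
  cases h : bValid labels with
  | nil =>
    rw [bValid_eq_myValid] at h
    simp [h]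
  | cons i rest =>
    rw [bValid_eq_myValid] at h
    simp only [h]
    rw [List.getLast?_eq_some_getLast (by simp : (i :: rest) ≠ [])]
    simp
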